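-- pv_equiv track=rewrite | github.com/imoutidi/newsMiningVol3 | NER_Tools/entity_tools.py | remove_wrong_entities
-- ===== SOURCE A (Python) =====
-- def remove_wrong_entities(sentence_entities, time_list):
--     correct_entities = set()
--     for key, value in sentence_entities.items():
--         if len(value) > 1:
--             if value[0] in time_list:
--                 max_candidate = [value[0], time_list.index(value[0])]
--             else:
--                 max_candidate = [value[0], -1]
--             for candidate_entity in value[1:]:
--                 if candidate_entity in time_list:
--                     candidate_score = time_list.index(candidate_entity)
--                 else:
--                     candidate_score = -1
--                 if max_candidate[1] < candidate_score:
--                     max_candidate = [candidate_entity, candidate_score]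
--             if max_candidate[1] > -1:
--                 correct_entities.add(max_candidate[0])
--         else:
--             correct_entities.add(value[0])
--
--     return correct_entities
-- ===== SOURCE B (Python) =====
-- def remove_wrong_entities(sentence_entities, time_list):
--     correct_entities = set()
--     for value in sentence_entities.values():
--         if len(value) > 1:
--             # scan time_list once: the chosen entity is the member of value
--             # whose FIRST occurrence in time_list comes latest
--             remaining = set(value)
--             best = None
--             for t in time_list:
--                 if t in remaining:
--                     remaining.remove(t)
--                     best = t
--             if best is not None:
--                 correct_entities.add(best)
--         else:
--             correct_entities.add(value[0])
--     return correct_entities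
-- ===== Notes on version B (the rewrite author's own statement) =====
-- stated objective: alternative
-- what changed: A scores every candidate with its own time_list.index scan and keeps a running argmax over the value list; B instead makes one forward scan of time_list per multi-entity key with a remove-on-first-match member set, so the last newly-seen member of the value list is the chosen entity and no index computation exists.
import Mathlib
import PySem

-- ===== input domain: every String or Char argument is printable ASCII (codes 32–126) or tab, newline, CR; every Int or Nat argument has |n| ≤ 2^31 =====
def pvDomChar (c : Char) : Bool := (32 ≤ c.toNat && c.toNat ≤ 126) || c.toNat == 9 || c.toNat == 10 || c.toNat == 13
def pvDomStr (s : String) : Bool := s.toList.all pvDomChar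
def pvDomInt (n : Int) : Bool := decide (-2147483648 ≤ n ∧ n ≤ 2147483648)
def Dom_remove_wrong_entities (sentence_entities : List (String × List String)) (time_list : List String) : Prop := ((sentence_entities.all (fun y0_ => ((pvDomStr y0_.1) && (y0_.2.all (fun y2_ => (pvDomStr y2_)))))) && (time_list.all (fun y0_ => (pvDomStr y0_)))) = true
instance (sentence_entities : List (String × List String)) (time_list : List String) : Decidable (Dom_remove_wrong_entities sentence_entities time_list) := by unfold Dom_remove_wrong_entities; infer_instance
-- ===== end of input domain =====

-- B replaces A's per-candidate time_list.index scans by a single forward scan of time_list per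
-- multi-entity key (remove-on-first-match set, keep the last hit); objective: alternative decomposition.

-- ===== PORT A =====
-- A's two-line "time_list.index(c) if c in time_list else -1" score computation
def pvScore (time_list : List String) (candidate : String) : Int :=
  if time_list.contains candidate then ((PySem.List.index? time_list candidate).getD 0 : Int) else -1

def remove_wrong_entities (sentence_entities : List (String × List String)) (time_list : List String) : List String :=
  sentence_entities.foldl (fun correct_entities kv =>
    let value := kv.2
    if value.length > 1 then
      let v0 := (PySem.List.pyGet? value 0).getD ""
      let max_candidate :=
        (PySem.List.slice value (some 1) none).foldl
          (fun mc candidate =>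
            let candidate_score := pvScore time_list candidate
            if mc.2 < candidate_score then (candidate, candidate_score) else mc)
          (v0, pvScore time_list v0)
      if max_candidate.2 > -1 then PySem.Set.add correct_entities max_candidate.1 else correct_entities
    else
      PySem.Set.add correct_entities ((PySem.List.pyGet? value 0).getD "")
  ) PySem.Set.empty

-- ===== PORT B =====
def remove_wrong_entities_alt (sentence_entities : List (String × List String)) (time_list : List String) : List String :=
  sentence_entities.foldl (fun correct_entities kv =>
    let value := kv.2
    if value.length > 1 then
      let st := time_list.foldl
        (fun (st : PySem.Set String × Option String) t =>
          if PySem.Set.contains st.1 t then ((PySem.Set.remove? st.1 t).getD st.1, some t) else st)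
        (PySem.Set.ofList value, (none : Option String))
      match st.2 with
      | some best => PySem.Set.add correct_entities best
      | none => correct_entities
    else
      PySem.Set.add correct_entities ((PySem.List.pyGet? value 0).getD "")
  ) PySem.Set.empty

-- ===== PRECONDITION & SPEC =====
-- Pre_ excludes inputs in which some dict value list is empty: there Python A raises IndexError on value[0].
def Pre_remove_wrong_entities (sentence_entities : List (String × List String)) (time_list : List String) : Prop :=
  ∀ p ∈ sentence_entities, p.2 ≠ []
instance (sentence_entities : List (String × List String)) (time_list : List String) : Decidable (Pre_remove_wrong_entities sentence_entities time_list) := by unfold Pre_remove_wrong_entities; infer_instance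

def pvWitness_remove_wrong_entities : (List (String × List String)) × List String :=
  ([("k1", ["alice", "bob"]), ("k2", ["carl"])], ["bob", "alice"])

def Spec_remove_wrong_entities (sentence_entities : List (String × List String)) (time_list : List String) (out : List String) : Prop := out = remove_wrong_entities_alt sentence_entities time_list
instance (sentence_entities : List (String × List String)) (time_list : List String) (out : List String) : Decidable (Spec_remove_wrong_entities sentence_entities time_list out) := by unfold Spec_remove_wrong_entities; infer_instance

-- ===== CLAIM (what is proved, stated in full; the proofs are below) =====
def Claim_equal_remove_wrong_entities : Prop := ∀ (sentence_entities : List (String × List String)) (time_list : List String), Dom_remove_wrong_entities sentence_entities time_list → Pre_remove_wrong_entities sentence_entities time_list → Spec_remove_wrong_entities sentence_entities time_list (remove_wrong_entities sentence_entities time_list)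

-- ===== LEMMAS AND PROOFS =====

theorem pvScore_of_mem {tl : List String} {c : String} (h : c ∈ tl) :
    pvScore tl c = (tl.idxOf c : Int) := by
  obtain ⟨k, hk⟩ : ∃ k, List.idxOf? c tl = some k :=
    Option.ne_none_iff_exists'.mp (by simpa [List.idxOf?_eq_none_iff] using h)
  simp [pvScore, h, PySem.List.index?_eq_idxOf?, hk, List.idxOf_eq_getD_idxOf?]

theorem pvScore_of_not_mem {tl : List String} {c : String} (h : c ∉ tl) :
    pvScore tl c = -1 := by
  simp [pvScore, h]

theorem mem_of_pvScore_pos {tl : List String} {c : String} (h : -1 < pvScore tl c) : c ∈ tl := by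
  by_cases hm : c ∈ tl
  · exact hm
  · rw [pvScore_of_not_mem hm] at h; omega

theorem foldA_char (tl : List String) : ∀ (rest : List String) (p : String × Int),
    p.2 = pvScore tl p.1 →
    (rest.foldl (fun mc candidate =>
        if mc.2 < pvScore tl candidate then (candidate, pvScore tl candidate) else mc) p).2
      = pvScore tl (rest.foldl (fun mc candidate =>
        if mc.2 < pvScore tl candidate then (candidate, pvScore tl candidate) else mc) p).1
    ∧ ((rest.foldl (fun mc candidate =>
        if mc.2 < pvScore tl candidate then (candidate, pvScore tl candidate) else mc) p).1 = p.1
       ∨ (rest.foldl (fun mc candidate =>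
        if mc.2 < pvScore tl candidate then (candidate, pvScore tl candidate) else mc) p).1 ∈ rest)
    ∧ p.2 ≤ (rest.foldl (fun mc candidate =>
        if mc.2 < pvScore tl candidate then (candidate, pvScore tl candidate) else mc) p).2
    ∧ ∀ c ∈ rest, pvScore tl c ≤ (rest.foldl (fun mc candidate =>
        if mc.2 < pvScore tl candidate then (candidate, pvScore tl candidate) else mc) p).2 := by
  intro rest
  induction rest with
  | nil => intro p hp; exact ⟨hp, Or.inl rfl, le_refl _, by simp⟩
  | cons c rest ih =>
    intro p hp
    simp only [List.foldl_cons]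
    by_cases hc : p.2 < pvScore tl c
    · simp only [if_pos hc]
      obtain ⟨h1, h2, h3, h4⟩ := ih (c, pvScore tl c) rfl
      refine ⟨h1, ?_, le_trans (le_of_lt hc) h3, ?_⟩
      · rcases h2 with h | h
        · exact Or.inr (by simp [h])
        · exact Or.inr (List.mem_cons_of_mem _ h)
      · intro x hx
        rcases List.mem_cons.mp hx with rfl | hx
        · exact h3
        · exact h4 x hx
    · simp only [if_neg hc]
      obtain ⟨h1, h2, h3, h4⟩ := ih p hp
      refine ⟨h1, ?_, h3, ?_⟩
      · rcases h2 with h | h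
        · exact Or.inl h
        · exact Or.inr (List.mem_cons_of_mem _ h)
      · intro x hx
        rcases List.mem_cons.mp hx with rfl | hx
        · omega
        · exact h4 x hx

theorem ofList_append_singleton (tl : List String) (t : String) :
    PySem.Set.ofList (tl ++ [t]) =
      if t ∈ tl then PySem.Set.ofList tl else PySem.Set.ofList tl ++ [t] := by
  have : PySem.Set.ofList (tl ++ [t]) = PySem.Set.add (PySem.Set.ofList tl) t := by
    simp [PySem.Set.ofList, List.foldl_append]
  rw [this, PySem.Set.add_eq_ite]
  simp [PySem.Set.mem_ofList]

theorem foldB_char (value : List String) (tl : List String) :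
    tl.foldl (fun (st : PySem.Set String × Option String) t =>
        if PySem.Set.contains st.1 t then ((PySem.Set.remove? st.1 t).getD st.1, some t) else st)
      (PySem.Set.ofList value, (none : Option String))
    = ((PySem.Set.ofList value).filter (fun x => !tl.contains x),
       ((PySem.Set.ofList tl).filter (fun t => value.contains t)).getLast?) := by
  induction tl using List.reverseRecOn with
  | nil => simp [PySem.Set.ofList, PySem.Set.empty]
  | append_singleton tl t ih =>
    rw [List.foldl_append, ih]
    simp only [List.foldl_cons, List.foldl_nil]
    by_cases ht : t ∈ tl
    · have hcond : PySem.Set.contains ((PySem.Set.ofList value).filter (fun x => !tl.contains x)) t = false := by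
        simp [PySem.Set.contains, List.contains_eq_mem, List.mem_filter, ht]
      rw [hcond, if_neg Bool.false_ne_true, Prod.mk.injEq]
      constructor
      · apply List.filter_congr
        intro x _
        by_cases hx : x = t
        · subst hx; simp [ht]
        · simp [hx]
      · rw [ofList_append_singleton, if_pos ht]
    · by_cases hv : t ∈ value
      · have hcond : PySem.Set.contains ((PySem.Set.ofList value).filter (fun x => !tl.contains x)) t = true := by
          simp [PySem.Set.contains, List.contains_eq_mem, List.mem_filter, PySem.Set.mem_ofList, ht, hv]
        rw [hcond, if_pos rfl]
        have hrem : PySem.Set.remove? ((PySem.Set.ofList value).filter (fun x => !tl.contains x)) t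
            = some (((PySem.Set.ofList value).filter (fun x => !tl.contains x)).filter (fun y => !(y == t))) := by
          rw [PySem.Set.remove?, if_pos hcond]; rfl
        rw [hrem, Option.getD_some, Prod.mk.injEq]
        constructor
        · rw [List.filter_filter]
          apply List.filter_congr
          intro x _
          by_cases hx : x = t
          · subst hx; simp [ht]
          · simp [hx]
        · rw [ofList_append_singleton, if_neg ht, List.filter_append]
          rw [show (List.filter (fun t' => value.contains t') [t]) = [t] by simp [hv]]
          rw [List.getLast?_concat]
      · have hcond : PySem.Set.contains ((PySem.Set.ofList value).filter (fun x => !tl.contains x)) t = false := by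
          simp [PySem.Set.contains, List.contains_eq_mem, List.mem_filter, PySem.Set.mem_ofList, hv]
        rw [hcond, if_neg Bool.false_ne_true, Prod.mk.injEq]
        constructor
        · apply List.filter_congr
          intro x hx
          have hxv : x ∈ value := (PySem.Set.mem_ofList value x).mp hx
          have hxt : x ≠ t := fun h => hv (h ▸ hxv)
          simp [hxt]
        · rw [ofList_append_singleton, if_neg ht, List.filter_append]
          rw [show (List.filter (fun t' => value.contains t') [t]) = [] by simp [hv], List.append_nil]

theorem getLast_max (value : List String) (tl : List String) :
    ∀ e, ((PySem.Set.ofList tl).filter (fun t => value.contains t)).getLast? = some e →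
      e ∈ tl ∧ e ∈ value ∧ ∀ c ∈ tl, c ∈ value → tl.idxOf c ≤ tl.idxOf e := by
  induction tl using List.reverseRecOn with
  | nil => intro e he; simp [PySem.Set.ofList, PySem.Set.empty] at he
  | append_singleton tl t ih =>
    intro e he
    by_cases ht : t ∈ tl
    · rw [ofList_append_singleton, if_pos ht] at he
      obtain ⟨h1, h2, h3⟩ := ih e he
      refine ⟨List.mem_append_left _ h1, h2, ?_⟩
      intro c hc hcv
      have hc' : c ∈ tl := by
        rcases List.mem_append.mp hc with h | h
        · exact h
        · simpa using (List.mem_singleton.mp h) ▸ ht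
      rw [List.idxOf_append, if_pos hc', List.idxOf_append, if_pos h1]
      exact h3 c hc' hcv
    · rw [ofList_append_singleton, if_neg ht, List.filter_append] at he
      by_cases hv : t ∈ value
      · rw [show (List.filter (fun t' => value.contains t') [t]) = [t] by simp [hv]] at he
        have het : e = t := by rw [List.getLast?_concat] at he; exact (Option.some_inj.mp he).symm
        subst het
        refine ⟨List.mem_append_right _ (List.mem_singleton.mpr rfl), hv, ?_⟩
        intro c hc hcv
        have hidt : List.idxOf e (tl ++ [e]) = tl.length := by
          rw [List.idxOf_append, if_neg ht]
          simp
        rw [hidt]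
        rcases List.mem_append.mp hc with h | h
        · rw [List.idxOf_append, if_pos h]
          exact le_of_lt (List.idxOf_lt_length_of_mem h)
        · rw [List.mem_singleton.mp h, hidt]
      · rw [show (List.filter (fun t' => value.contains t') [t]) = [] by simp [hv], List.append_nil] at he
        obtain ⟨h1, h2, h3⟩ := ih e he
        refine ⟨List.mem_append_left _ h1, h2, ?_⟩
        intro c hc hcv
        have hc' : c ∈ tl := by
          rcases List.mem_append.mp hc with h | h
          · exact h
          · exact absurd ((List.mem_singleton.mp h) ▸ hcv) hv
        rw [List.idxOf_append, if_pos hc', List.idxOf_append, if_pos h1]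
        exact h3 c hc' hcv

theorem mem_filter_ofList {value tl : List String} {c : String} (hc : c ∈ tl) (hv : c ∈ value) :
    c ∈ (PySem.Set.ofList tl).filter (fun t => value.contains t) := by
  simp [List.mem_filter, PySem.Set.mem_ofList, hc, hv]

theorem step_eq (time_list : List String) (correct_entities : List String) (kv : String × List String) :
    (let value := kv.2
     if value.length > 1 then
      let v0 := (PySem.List.pyGet? value 0).getD ""
      let max_candidate :=
        (PySem.List.slice value (some 1) none).foldl
          (fun mc candidate =>
            let candidate_score := pvScore time_list candidate
            if mc.2 < candidate_score then (candidate, candidate_score) else mc)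
          (v0, pvScore time_list v0)
      if max_candidate.2 > -1 then PySem.Set.add correct_entities max_candidate.1 else correct_entities
     else
      PySem.Set.add correct_entities ((PySem.List.pyGet? value 0).getD ""))
    = (let value := kv.2
       if value.length > 1 then
        let st := time_list.foldl
          (fun (st : PySem.Set String × Option String) t =>
            if PySem.Set.contains st.1 t then ((PySem.Set.remove? st.1 t).getD st.1, some t) else st)
          (PySem.Set.ofList value, (none : Option String))
        match st.2 with
        | some best => PySem.Set.add correct_entities best
        | none => correct_entities
       else
        PySem.Set.add correct_entities ((PySem.List.pyGet? value 0).getD "")) := by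
  obtain ⟨k, value⟩ := kv
  by_cases h1 : value.length > 1
  · simp only [if_pos h1]
    cases value with
    | nil => simp at h1
    | cons v0 rest =>
      have hslice : PySem.List.slice (v0 :: rest) (some 1) none = rest := by simp [pysem]
      have hget : (PySem.List.pyGet? (v0 :: rest) 0).getD "" = v0 := by
        rw [PySem.List.pyGet?_zero_cons]; rfl
      rw [foldB_char]
      simp only [hslice, hget]
      set mc := rest.foldl
          (fun mc candidate =>
            if mc.2 < pvScore time_list candidate then (candidate, pvScore time_list candidate) else mc)
          (v0, pvScore time_list v0) with hmc
      obtain ⟨hsc, hmem, hinit, hmax⟩ := foldA_char time_list rest (v0, pvScore time_list v0) rfl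
      rw [← hmc] at hsc hmem hinit hmax
      have hmemv : mc.1 ∈ v0 :: rest := by
        rcases hmem with h | h
        · exact h ▸ List.mem_cons_self
        · exact List.mem_cons_of_mem _ h
      have hmaxv : ∀ c ∈ v0 :: rest, pvScore time_list c ≤ mc.2 := by
        intro c hc
        rcases List.mem_cons.mp hc with rfl | hc
        · exact hinit
        · exact hmax c hc
      by_cases hpos : mc.2 > -1
      · rw [if_pos hpos]
        have hmtl : mc.1 ∈ time_list := mem_of_pvScore_pos (hsc ▸ hpos)
        have hu : mc.1 ∈ (PySem.Set.ofList time_list).filter (fun t => (v0 :: rest).contains t) :=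
          mem_filter_ofList hmtl hmemv
        obtain ⟨e, he⟩ : ∃ e, ((PySem.Set.ofList time_list).filter (fun t => (v0 :: rest).contains t)).getLast? = some e := by
          cases hlast : ((PySem.Set.ofList time_list).filter (fun t => (v0 :: rest).contains t)).getLast? with
          | none => rw [List.getLast?_eq_none_iff] at hlast; rw [hlast] at hu; simp at hu
          | some e => exact ⟨e, rfl⟩
        obtain ⟨hetl, hev, hemax⟩ := getLast_max (v0 :: rest) time_list e he
        have h5 : pvScore time_list e ≤ mc.2 := hmaxv e hev
        have h6 : (time_list.idxOf mc.1 : Int) ≤ (time_list.idxOf e : Int) := by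
          exact_mod_cast hemax mc.1 hmtl hmemv
        rw [pvScore_of_mem hetl] at h5
        have hsc' : mc.2 = (time_list.idxOf mc.1 : Int) := by rw [hsc, pvScore_of_mem hmtl]
        have hidx : List.idxOf e time_list = List.idxOf mc.1 time_list := by omega
        have hem : e = mc.1 := (List.idxOf_inj hetl).mp hidx
        rw [he, hem]
      · rw [if_neg hpos]
        have hu : ((PySem.Set.ofList time_list).filter (fun t => (v0 :: rest).contains t)) = [] := by
          rw [List.eq_nil_iff_forall_not_mem]
          intro x hx
          have hxt : x ∈ time_list := by
            have := List.mem_filter.mp hx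
            exact (PySem.Set.mem_ofList time_list x).mp this.1
          have hxv : x ∈ v0 :: rest := by
            have := List.mem_filter.mp hx
            simpa [List.contains_eq_mem] using this.2
          have hle := hmaxv x hxv
          rw [pvScore_of_mem hxt] at hle
          have hnn : (0:Int) ≤ (List.idxOf x time_list : Int) := Int.natCast_nonneg _
          omega
        rw [hu]
        rfl
  · simp [h1]

-- ===== VERDICT (by name: the statement is the Claim_ definition above) =====
theorem remove_wrong_entities_spec : Claim_equal_remove_wrong_entities := by
  intro sentence_entities time_list _ _
  unfold Spec_remove_wrong_entities remove_wrong_entities remove_wrong_entities_alt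
  exact PySem.List.foldl_congr_mem sentence_entities _ _ _
    (fun acc kv _ => step_eq time_list acc kv)
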